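-- pv_equiv track=rewrite | github.com/RudraBhungaliya/Hiro | models/ai_engine.py | _count_depth
-- ===== SOURCE A (Python) =====
-- def _count_depth(text: str):
--     """Return (brace_depth, bracket_depth) of unclosed structures."""
--     depth_brace   = 0
--     depth_bracket = 0
--     in_string     = False
--     escape_next   = False
--
--     for ch in text:
--         if escape_next:
--             escape_next = False
--             continue
--         if ch == '\\' and in_string:
--             escape_next = True
--             continue
--         if ch == '"':
--             in_string = not in_string
--             continue
--         if in_string:
--             continue
--         if ch == '{':
--             depth_brace += 1
--         elif ch == '}':
--             depth_brace -= 1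
--         elif ch == '[':
--             depth_bracket += 1
--         elif ch == ']':
--             depth_bracket -= 1
--
--     return depth_brace, depth_bracket
-- ===== SOURCE B (Python) =====
-- def _count_depth(text: str):
--     """Return (brace_depth, bracket_depth) of unclosed structures."""
--     out = []
--     it = iter(text)
--     for c in it:
--         if c == '"':
--             for d in it:
--                 if d == '\\':
--                     next(it, None)
--                 elif d == '"':
--                     break
--         else:
--             out.append(c)
--     return (out.count('{') - out.count('}'), out.count('[') - out.count(']'))
-- ===== Notes on version B (the rewrite author's own statement) =====
-- stated objective: alternative
-- what changed: Replaces A's single interleaved scan with four state variables by a two-phase decomposition: first strip string literals (an inner skip-to-closing-quote loop handling backslash escapes), then count braces/brackets on the stripped text with plain .count calls.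
import Mathlib
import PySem

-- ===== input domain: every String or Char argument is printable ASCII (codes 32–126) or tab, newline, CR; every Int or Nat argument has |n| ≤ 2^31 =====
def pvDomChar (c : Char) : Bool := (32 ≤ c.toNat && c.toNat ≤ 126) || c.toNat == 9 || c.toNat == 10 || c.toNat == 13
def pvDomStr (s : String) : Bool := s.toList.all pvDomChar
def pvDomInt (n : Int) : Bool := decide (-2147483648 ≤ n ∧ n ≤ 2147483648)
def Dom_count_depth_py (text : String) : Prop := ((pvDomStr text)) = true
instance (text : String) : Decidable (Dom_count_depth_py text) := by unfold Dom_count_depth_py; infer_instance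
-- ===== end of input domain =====

-- B replaces A's interleaved four-variable state machine by a strip-strings phase followed by
-- a plain count phase (objective: alternative decomposition; no speed claim).

-- ===== PORT A =====
-- state: (depth_brace, depth_bracket, in_string, escape_next)
def cdStepA (s : Int × Int × Bool × Bool) (ch : Char) : Int × Int × Bool × Bool :=
  match s with
  | (db, dk, instr, esc) =>
    if esc then (db, dk, instr, false)
    else if ch = '\\' && instr then (db, dk, instr, true)
    else if ch = '"' then (db, dk, !instr, false)
    else if instr then (db, dk, instr, esc)
    else if ch = '{' then (db + 1, dk, instr, esc)
    else if ch = '}' then (db - 1, dk, instr, esc)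
    else if ch = '[' then (db, dk + 1, instr, esc)
    else if ch = ']' then (db, dk - 1, instr, esc)
    else (db, dk, instr, esc)

def count_depth_py (text : String) : Int × Int :=
  let s := text.toList.foldl cdStepA (0, 0, false, false)
  (s.1, s.2.1)

-- ===== PORT B =====
-- inner 'for d in it' loop of Source B: consume chars up to and including the closing quote,
-- a backslash consuming the following char; return the remaining characters
def cdSkipStr : List Char → List Char
  | [] => []
  | d :: ds =>
    if d = '\\' then cdSkipStr ds.tail
    else if d = '"' then ds
    else cdSkipStr ds
termination_by l => l.length
decreasing_by all_goals (simp [List.length_tail]; try omega)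

-- needed by cdStrip's termination
theorem cdSkipStr_len_le (l : List Char) : (cdSkipStr l).length ≤ l.length := by
  induction l using cdSkipStr.induct
  all_goals simp_all [cdSkipStr, List.length_tail]
  all_goals omega

-- outer 'for c in it' loop of Source B: collect the characters outside string literals
def cdStrip : List Char → List Char
  | [] => []
  | c :: cs =>
    if c = '"' then cdStrip (cdSkipStr cs)
    else c :: cdStrip cs
termination_by l => l.length
decreasing_by
  all_goals have := cdSkipStr_len_le cs
  all_goals simp
  omega

def count_depth_py_alt (text : String) : Int × Int :=
  let out := cdStrip text.toList
  ((PySem.List.count out '{' : Int) - PySem.List.count out '}',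
   (PySem.List.count out '[' : Int) - PySem.List.count out ']')

-- ===== PRECONDITION & SPEC =====
def Spec_count_depth_py (text : String) (out : Int × Int) : Prop := out = count_depth_py_alt text
instance (text : String) (out : Int × Int) : Decidable (Spec_count_depth_py text out) := by unfold Spec_count_depth_py; infer_instance

-- ===== CLAIM (what is proved, stated in full; the proofs are below) =====
def Claim_equal_count_depth_py : Prop := ∀ (text : String), Dom_count_depth_py text → Spec_count_depth_py text (count_depth_py text)

-- ===== LEMMAS AND PROOFS =====

-- the two counts B extracts from a stripped character list
def cdCnt (l : List Char) : Int × Int :=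
  ((PySem.List.count l '{' : Int) - PySem.List.count l '}',
   (PySem.List.count l '[' : Int) - PySem.List.count l ']')

theorem cdCnt_cons (c : Char) (l : List Char) :
    cdCnt (c :: l) =
      ((if c = '{' then 1 else 0) - (if c = '}' then 1 else 0) + (cdCnt l).1,
       (if c = '[' then 1 else 0) - (if c = ']' then 1 else 0) + (cdCnt l).2) := by
  simp [cdCnt, PySem.List.count_eq, List.count_cons]
  constructor <;> split_ifs <;> push_cast <;> ring

-- invariant: from out-of-string state A's fold adds B's counts of the stripped list;
-- from in-string state A's fold equals the out-of-string fold over the post-string suffix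
theorem cdMain : ∀ (n : Nat) (cs : List Char), cs.length ≤ n →
    (∀ db dk : Int,
      (cs.foldl cdStepA (db, dk, false, false)).1 = db + (cdCnt (cdStrip cs)).1 ∧
      (cs.foldl cdStepA (db, dk, false, false)).2.1 = dk + (cdCnt (cdStrip cs)).2) ∧
    (∀ db dk : Int,
      (cs.foldl cdStepA (db, dk, true, false)).1 =
        ((cdSkipStr cs).foldl cdStepA (db, dk, false, false)).1 ∧
      (cs.foldl cdStepA (db, dk, true, false)).2.1 =
        ((cdSkipStr cs).foldl cdStepA (db, dk, false, false)).2.1) := by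
  intro n
  induction n with
  | zero =>
    intro cs h
    have : cs = [] := List.eq_nil_of_length_eq_zero (Nat.le_zero.mp h)
    subst this
    simp [cdStrip, cdSkipStr, cdCnt, PySem.List.count_eq]
  | succ n ih =>
    intro cs h
    match cs with
    | [] => simp [cdStrip, cdSkipStr, cdCnt, PySem.List.count_eq]
    | c :: cs' =>
      simp only [List.length_cons, Nat.add_le_add_iff_right] at h
      constructor
      · intro db dk
        by_cases hq : c = '"'
        · subst hq
          have hskip : (cdSkipStr cs').length ≤ n :=
            le_trans (cdSkipStr_len_le cs') h
          have hstep : cdStepA (db, dk, false, false) '"' = (db, dk, true, false) := by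
            simp [cdStepA]
          rw [List.foldl_cons, hstep]
          have hstrip : cdStrip ('"' :: cs') = cdStrip (cdSkipStr cs') := by
            simp [cdStrip]
          rw [hstrip]
          have h2 := (ih cs' h).2 db dk
          have h1 := (ih (cdSkipStr cs') hskip).1 db dk
          exact ⟨h2.1.trans h1.1, h2.2.trans h1.2⟩
        · have h1 := (ih cs' h).1
          simp only [List.foldl_cons]
          have hstep : cdStepA (db, dk, false, false) c =
              ((if c = '{' then db + 1 else if c = '}' then db - 1 else db),
               (if c = '[' then dk + 1 else if c = ']' then dk - 1 else dk),
               false, false) := by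
            simp [cdStepA, hq]
            split_ifs <;> simp_all
          rw [hstep]
          have hstrip : cdStrip (c :: cs') = c :: cdStrip cs' := by
            simp [cdStrip, hq]
          rw [hstrip, cdCnt_cons]
          have := h1 (if c = '{' then db + 1 else if c = '}' then db - 1 else db)
                     (if c = '[' then dk + 1 else if c = ']' then dk - 1 else dk)
          constructor
          · rw [this.1]; split_ifs <;> first | omega | simp_all
          · rw [this.2]; split_ifs <;> first | omega | simp_all
      · intro db dk
        by_cases hb : c = '\\'
        · subst hb
          simp only [List.foldl_cons]
          have hstep : cdStepA (db, dk, true, false) '\\' = (db, dk, true, true) := by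
            simp [cdStepA]
          rw [hstep]
          match cs' with
          | [] => simp [cdSkipStr]
          | e :: es =>
            have hes : es.length ≤ n := by
              simp at h; omega
            have hstep2 : cdStepA (db, dk, true, true) e = (db, dk, true, false) := by
              simp [cdStepA]
            have hskip : cdSkipStr ('\\' :: e :: es) = cdSkipStr es := by
              simp [cdSkipStr]
            rw [hskip]
            simp only [List.foldl_cons, hstep2]
            exact (ih es hes).2 db dk
        · by_cases hq : c = '"'
          · subst hq
            have hstep : cdStepA (db, dk, true, false) '"' = (db, dk, false, false) := by
              simp [cdStepA]
            have hskip : cdSkipStr ('"' :: cs') = cs' := by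
              simp [cdSkipStr]
            simp [List.foldl_cons, hstep, hskip]
          · have hstep : cdStepA (db, dk, true, false) c = (db, dk, true, false) := by
              simp [cdStepA, hb, hq]
            have hskip : cdSkipStr (c :: cs') = cdSkipStr cs' := by
              simp [cdSkipStr, hb, hq]
            simp only [List.foldl_cons, hstep, hskip]
            exact (ih cs' h).2 db dk

-- ===== VERDICT (by name: the statement is the Claim_ definition above) =====
theorem count_depth_py_spec : Claim_equal_count_depth_py := by
  intro text _
  unfold Spec_count_depth_py count_depth_py count_depth_py_alt
  have h := ((cdMain text.toList.length text.toList le_rfl).1 0 0)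
  simp only [zero_add] at h
  simp only [cdCnt] at h
  exact Prod.ext h.1 h.2
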